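-- pv_equiv track=rewrite | github.com/vahapunlu/FP | fugueforge/core/generator.py | _check_voice_crossing
-- ===== SOURCE A (Python) =====
-- def _check_voice_crossing(
--     voice: int,
--     candidate: int,
--     other_voices_current: dict[int, int],
-- ) -> bool:
--     """Return True if candidate causes voice crossing."""
--     for ov, op in other_voices_current.items():
--         if op == -1:
--             continue
--         # Lower-numbered voice should be higher pitch
--         if voice < ov and candidate < op:
--             return True
--         if voice > ov and candidate > op:
--             return True
--     return False
-- ===== SOURCE B (Python) =====
-- def _check_voice_crossing(
--     voice: int,
--     candidate: int,
--     other_voices_current: dict[int, int],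
-- ) -> bool:
--     """Return True if candidate causes voice crossing."""
--     lower_ops = [op for ov, op in other_voices_current.items() if ov < voice and op != -1]
--     higher_ops = [op for ov, op in other_voices_current.items() if ov > voice and op != -1]
--     return (bool(lower_ops) and candidate > min(lower_ops)) or (
--         bool(higher_ops) and candidate < max(higher_ops)
--     )
-- ===== Notes on version B (the rewrite author's own statement) =====
-- stated objective: alternative
-- what changed: Replaces the per-entry early-exit scan with two filtered aggregations: partition the non-sentinel other voices into lower- and higher-numbered groups, reduce each to one threshold (min of lower pitches, max of higher pitches), and compare the candidate against those two thresholds.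
import Mathlib
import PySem

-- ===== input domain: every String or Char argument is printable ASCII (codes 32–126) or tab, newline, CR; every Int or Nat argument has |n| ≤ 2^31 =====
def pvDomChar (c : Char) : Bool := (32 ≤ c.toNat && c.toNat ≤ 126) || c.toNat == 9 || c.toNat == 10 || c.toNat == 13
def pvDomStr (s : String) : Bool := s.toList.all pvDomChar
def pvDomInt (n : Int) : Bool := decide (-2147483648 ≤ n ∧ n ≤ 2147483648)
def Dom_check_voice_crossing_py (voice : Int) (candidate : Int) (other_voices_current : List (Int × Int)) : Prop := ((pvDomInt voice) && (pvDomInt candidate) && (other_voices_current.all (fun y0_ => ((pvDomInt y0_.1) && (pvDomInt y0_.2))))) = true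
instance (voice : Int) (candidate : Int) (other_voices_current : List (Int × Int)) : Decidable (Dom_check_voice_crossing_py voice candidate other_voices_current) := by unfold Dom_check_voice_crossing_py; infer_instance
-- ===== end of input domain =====

-- B replaces A's per-entry early-exit scan by two filtered aggregations (min of lower voices' pitches, max of higher voices' pitches); alternative decomposition, same cost.


-- ===== PORT A =====
-- the for-loop over .items() with early returns, as structural recursion
def pvLoopA (voice : Int) (candidate : Int) : List (Int × Int) → Bool
  | [] => false
  | (ov, op) :: rest =>
      if op = -1 then pvLoopA voice candidate rest
      else if voice < ov ∧ candidate < op then true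
      else if voice > ov ∧ candidate > op then true
      else pvLoopA voice candidate rest

def check_voice_crossing_py (voice : Int) (candidate : Int) (other_voices_current : List (Int × Int)) : Bool :=
  pvLoopA voice candidate other_voices_current

-- ===== PORT B =====
def check_voice_crossing_py_alt (voice : Int) (candidate : Int) (other_voices_current : List (Int × Int)) : Bool :=
  let lower_ops := (other_voices_current.filter (fun p => decide (p.1 < voice) && decide (p.2 ≠ -1))).map (fun p => p.2)
  let higher_ops := (other_voices_current.filter (fun p => decide (p.1 > voice) && decide (p.2 ≠ -1))).map (fun p => p.2)
  (match PySem.List.min? lower_ops (fun x => x) with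
   | none => false
   | some m => decide (candidate > m)) ||
  (match PySem.List.max? higher_ops (fun x => x) with
   | none => false
   | some m => decide (candidate < m))

-- ===== PRECONDITION & SPEC =====
def Spec_check_voice_crossing_py (voice : Int) (candidate : Int) (other_voices_current : List (Int × Int)) (out : Bool) : Prop := out = check_voice_crossing_py_alt voice candidate other_voices_current
instance (voice : Int) (candidate : Int) (other_voices_current : List (Int × Int)) (out : Bool) : Decidable (Spec_check_voice_crossing_py voice candidate other_voices_current out) := by unfold Spec_check_voice_crossing_py; infer_instance

-- ===== CLAIM (what is proved, stated in full; the proofs are below) =====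
def Claim_equal_check_voice_crossing_py : Prop := ∀ (voice : Int) (candidate : Int) (other_voices_current : List (Int × Int)), Dom_check_voice_crossing_py voice candidate other_voices_current → Spec_check_voice_crossing_py voice candidate other_voices_current (check_voice_crossing_py voice candidate other_voices_current)

-- ===== LEMMAS AND PROOFS =====

-- the crossing predicate both sides decide, entry-wise
def pvCross (voice : Int) (candidate : Int) (p : Int × Int) : Bool :=
  decide (p.2 ≠ -1) && (decide (voice < p.1 ∧ candidate < p.2) || decide (voice > p.1 ∧ candidate > p.2))

theorem pvLoopA_eq_any (voice candidate : Int) (l : List (Int × Int)) :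
    pvLoopA voice candidate l = l.any (pvCross voice candidate) := by
  induction l with
  | nil => rfl
  | cons h t ih =>
      obtain ⟨ov, op⟩ := h
      simp only [pvLoopA, List.any_cons, pvCross, ih]
      split_ifs with h1 h2 h3 <;> simp_all

theorem min_side_eq_any (candidate : Int) (l : List Int) :
    (match PySem.List.min? l (fun x => x) with
     | none => false
     | some m => decide (candidate > m)) = l.any (fun x => decide (x < candidate)) := by
  cases hm : PySem.List.min? l (fun x => x) with
  | none =>
      have := (PySem.List.min?_eq_none_iff (xs := l) (key := fun x => x)).mp hm
      simp [this]
  | some m =>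
      have hmem := PySem.List.min?_mem hm
      have hmin := PySem.List.min?_isMin hm
      simp only []
      by_cases hc : m < candidate
      · simp only [gt_iff_lt, hc, decide_true]
        exact (List.any_eq_true.mpr ⟨m, hmem, by simpa using hc⟩).symm
      · simp only [gt_iff_lt, hc, decide_false]
        symm
        rw [List.any_eq_false]
        intro x hx
        have := hmin x hx
        simp only [decide_eq_true_eq]
        omega

theorem max_side_eq_any (candidate : Int) (l : List Int) :
    (match PySem.List.max? l (fun x => x) with
     | none => false
     | some m => decide (candidate < m)) = l.any (fun x => decide (candidate < x)) := by
  cases hm : PySem.List.max? l (fun x => x) with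
  | none =>
      have := (PySem.List.max?_eq_none_iff (xs := l) (key := fun x => x)).mp hm
      simp [this]
  | some m =>
      have hmem := PySem.List.max?_mem hm
      have hmax := PySem.List.max?_isMax hm
      simp only []
      by_cases hc : candidate < m
      · simp only [hc, decide_true]
        exact (List.any_eq_true.mpr ⟨m, hmem, by simpa using hc⟩).symm
      · simp only [hc, decide_false]
        symm
        rw [List.any_eq_false]
        intro x hx
        have := hmax x hx
        simp only [decide_eq_true_eq]
        omega

theorem pv_any_map (l : List (Int × Int)) (f : Int × Int → Int) (p : Int → Bool) :
    (l.map f).any p = l.any (fun x => p (f x)) := by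
  induction l with
  | nil => rfl
  | cons h t ih => simp [List.any_cons, ih]

theorem pv_any_filter (l : List (Int × Int)) (p q : Int × Int → Bool) :
    (l.filter p).any q = l.any (fun x => p x && q x) := by
  induction l with
  | nil => rfl
  | cons h t ih =>
      by_cases hp : p h <;> simp [hp, List.any_cons, ih]

theorem pv_any_or (l : List (Int × Int)) (f g : Int × Int → Bool) :
    (l.any f || l.any g) = l.any (fun x => f x || g x) := by
  induction l with
  | nil => rfl
  | cons h t ih =>
      simp only [List.any_cons, ← ih]
      cases f h <;> cases g h <;> simp

theorem alt_eq_any (voice candidate : Int) (l : List (Int × Int)) :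
    check_voice_crossing_py_alt voice candidate l = l.any (pvCross voice candidate) := by
  unfold check_voice_crossing_py_alt
  dsimp only
  rw [min_side_eq_any, max_side_eq_any, pv_any_map, pv_any_map, pv_any_filter,
    pv_any_filter, pv_any_or]
  refine congrArg l.any (funext fun p => ?_)
  rw [Bool.eq_iff_iff]
  simp only [pvCross, Bool.or_eq_true, Bool.and_eq_true, decide_eq_true_eq, gt_iff_lt, ne_eq]
  tauto

-- ===== VERDICT (by name: the statement is the Claim_ definition above) =====
theorem check_voice_crossing_py_spec : Claim_equal_check_voice_crossing_py := by
  intro voice candidate l _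
  unfold Spec_check_voice_crossing_py check_voice_crossing_py
  rw [pvLoopA_eq_any, alt_eq_any]
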